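-- pv_equiv track=rewrite | github.com/AP-MI-2021/lab-3-andreeailies12 | main.py | concatenareNumere
-- ===== SOURCE A (Python) =====
-- def concatenareNumere(l):
--     """
--     Determina concatenarea numerelor din lista si verificarea daca are cifrele in ordine crescatoare
--     :param l: lista de numere
--     :return:  True daca numarul concatenat cu cifrele in ordine crescatoare, in caz contrar False
--     """
--     nr = ""
--     for i in range(len(l)):
--         nr = nr + str(l[i])
--
--     nr = int(nr)
--
--     while nr > 9:
--         a = nr % 10
--         b = nr // 10 % 10
--         nr //= 10  # nr = nr  // 10
--         if a < b:
--             return False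
--
--     return True
-- ===== SOURCE B (Python) =====
-- def concatenareNumere(l):
--     nr = int(''.join(str(x) for x in l))
--     if nr <= 9:
--         return True
--     s = str(nr)
--     return list(s) == sorted(s)
-- ===== Notes on version B (the rewrite author's own statement) =====
-- stated objective: simpler
-- what changed: A checks digit order by a right-to-left while loop of %10 / //10 arithmetic on the concatenated integer; B instead takes the decimal string of that integer and returns list(s) == sorted(s), a sort-and-compare with no digit arithmetic.
import Mathlib
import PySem

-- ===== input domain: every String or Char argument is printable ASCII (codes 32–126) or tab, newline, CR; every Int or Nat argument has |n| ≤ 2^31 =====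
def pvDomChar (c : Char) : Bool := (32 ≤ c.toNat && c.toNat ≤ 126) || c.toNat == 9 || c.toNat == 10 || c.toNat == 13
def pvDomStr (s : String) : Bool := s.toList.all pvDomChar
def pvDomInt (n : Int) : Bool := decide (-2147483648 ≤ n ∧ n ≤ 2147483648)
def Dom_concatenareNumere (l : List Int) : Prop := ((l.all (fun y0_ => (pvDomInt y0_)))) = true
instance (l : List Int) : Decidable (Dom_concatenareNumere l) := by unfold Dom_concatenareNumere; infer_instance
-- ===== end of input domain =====

-- B replaces A's right-to-left %10 / //10 digit-comparison loop by a sort-and-compare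
-- (list(s) == sorted(s)) on the decimal string of the same concatenated integer (objective: simpler).

-- ===== PORT A =====
-- the 'while nr > 9' loop of A
def concatenareNumereLoop (nr : Int) : Bool :=
  if 9 < nr then
    let a := PySem.Int.mod nr 10
    let b := PySem.Int.mod (PySem.Int.floordiv nr 10) 10
    if a < b then false
    else concatenareNumereLoop (PySem.Int.floordiv nr 10)
  else true
termination_by nr.toNat
decreasing_by
  have h : PySem.Int.floordiv nr 10 = nr / 10 := PySem.Int.floordiv_eq_ediv_of_pos (by omega)
  rw [h]; omega

def concatenareNumere (l : List Int) : Bool :=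
  let nrStr := l.foldl (fun acc x => acc ++ PySem.Int.toChars x) ([] : List Char)
  match PySem.Int.ofChars? nrStr with
  | none => false   -- int(...) raises ValueError here; excluded by Pre_
  | some nr => concatenareNumereLoop nr

-- ===== PORT B =====
def concatenareNumere_alt (l : List Int) : Bool :=
  match PySem.Int.ofChars? (PySem.Chars.join [] (l.map PySem.Int.toChars)) with
  | none => false   -- int(...) raises ValueError here; excluded by Pre_
  | some nr =>
    if nr ≤ 9 then true
    else
      let s := PySem.Int.toChars nr
      decide (s = PySem.List.sorted s (fun x => x) false)

-- ===== PRECONDITION & SPEC =====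
-- Pre_ excludes exactly the inputs where int('…'.join(…)) raises ValueError in both A and B:
-- the empty list (int('')) and lists with a negative number after the first ('-' inside the string).
def Pre_concatenareNumere (l : List Int) : Prop := l ≠ [] ∧ ∀ x ∈ l.tail, 0 ≤ x
instance (l : List Int) : Decidable (Pre_concatenareNumere l) := by unfold Pre_concatenareNumere; infer_instance
def pvWitness_concatenareNumere : List Int := [12, 3, 45]

def Spec_concatenareNumere (l : List Int) (out : Bool) : Prop := out = concatenareNumere_alt l
instance (l : List Int) (out : Bool) : Decidable (Spec_concatenareNumere l out) := by unfold Spec_concatenareNumere; infer_instance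

-- ===== CLAIM (what is proved, stated in full; the proofs are below) =====
def Claim_equal_concatenareNumere : Prop := ∀ (l : List Int), Dom_concatenareNumere l → Pre_concatenareNumere l → Spec_concatenareNumere l (concatenareNumere l)

-- ===== LEMMAS AND PROOFS =====

-- the digit characters of m, most significant first (what str(nr) produces for nr ≥ 0)
def pvDigs (m : Nat) : List Char :=
  if m < 10 then [Nat.digitChar m]
  else pvDigs (m / 10) ++ [Nat.digitChar (m % 10)]
termination_by m
decreasing_by omega

-- A's while loop, on Nat
def pvLoopN (m : Nat) : Bool :=
  if 9 < m then
    if m % 10 < m / 10 % 10 then false else pvLoopN (m / 10)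
  else true
termination_by m
decreasing_by omega

lemma pvJoin_flatten (ps : List (List Char)) : PySem.Chars.join [] ps = ps.flatten := by
  induction ps with
  | nil => simp [PySem.Chars.join_nil]
  | cons p rest ih =>
    cases rest with
    | nil => simp [PySem.Chars.join_singleton]
    | cons q r => rw [PySem.Chars.join_cons_cons]; simp_all

lemma pvFoldl_flatten (l : List Int) (acc : List Char) :
    l.foldl (fun a x => a ++ PySem.Int.toChars x) acc = acc ++ (l.map PySem.Int.toChars).flatten := by
  induction l generalizing acc with
  | nil => simp
  | cons x t ih => simp [List.foldl_cons, ih, List.append_assoc]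

lemma pvToDigitsCore_eq (f : Nat) : ∀ (n : Nat) (acc : List Char), n < f →
    Nat.toDigitsCore 10 f n acc = pvDigs n ++ acc := by
  induction f with
  | zero => intro n acc h; omega
  | succ f ih =>
    intro n acc h
    rw [Nat.toDigitsCore]
    by_cases h0 : n / 10 = 0
    · have hn : n < 10 := by omega
      have : n % 10 = n := Nat.mod_eq_of_lt hn
      simp [h0, pvDigs, hn, this]
    · have hn : ¬ n < 10 := by omega
      simp only [h0, if_false]
      rw [ih (n / 10) _ (by omega)]
      conv_rhs => rw [pvDigs]
      simp [hn]

lemma pvToDigits_eq (m : Nat) : Nat.toDigits 10 m = pvDigs m := by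
  rw [Nat.toDigits, pvToDigitsCore_eq (m + 1) m [] (by omega)]; simp

lemma pvDigitChar_le_iff (a b : Nat) (ha : a < 10) (hb : b < 10) :
    (Nat.digitChar a ≤ Nat.digitChar b ↔ a ≤ b) := by
  interval_cases a <;> interval_cases b <;> simp <;> decide

lemma pvDigs_concat (m : Nat) : ∃ t, pvDigs m = t ++ [Nat.digitChar (m % 10)] := by
  by_cases h : m < 10
  · exact ⟨[], by rw [pvDigs]; simp [h, Nat.mod_eq_of_lt h]⟩
  · exact ⟨pvDigs (m / 10), by rw [pvDigs]; simp [h]⟩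

lemma pvPairwise_le_last (m : Nat) (hp : (pvDigs m).Pairwise (· ≤ ·)) :
    ∀ x ∈ pvDigs m, x ≤ Nat.digitChar (m % 10) := by
  obtain ⟨t, ht⟩ := pvDigs_concat m
  rw [ht] at hp ⊢
  rw [List.pairwise_append] at hp
  intro x hx
  rcases List.mem_append.mp hx with h1 | h2
  · exact hp.2.2 x h1 _ (by simp)
  · simp at h2; simp [h2]

lemma pvLoopN_eq_pairwise (m : Nat) : pvLoopN m = decide ((pvDigs m).Pairwise (· ≤ ·)) := by
  induction m using Nat.strong_induction_on with
  | _ m ih =>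
  by_cases h : m < 10
  · rw [pvLoopN, pvDigs]; simp [h, show ¬ 9 < m by omega]
  · rw [pvLoopN, pvDigs]
    simp only [show 9 < m by omega, if_true, h, if_false]
    have hlt10a : m % 10 < 10 := Nat.mod_lt _ (by omega)
    have hlt10b : m / 10 % 10 < 10 := Nat.mod_lt _ (by omega)
    by_cases hab : m % 10 < m / 10 % 10
    · -- A returns False; the digit list is not sorted: its last two entries decrease
      simp only [hab, if_true]
      obtain ⟨t, ht⟩ := pvDigs_concat (m / 10)
      rw [ht]
      have hnp : ¬ ((t ++ [Nat.digitChar (m / 10 % 10), Nat.digitChar (m % 10)]).Pairwise (· ≤ ·)) := by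
        intro hp
        have h2 := hp.sublist (List.sublist_append_right t _)
        rw [List.pairwise_cons] at h2
        have h3 := h2.1 (Nat.digitChar (m % 10)) (by simp)
        rw [pvDigitChar_le_iff _ _ hlt10b hlt10a] at h3
        omega
      simp only [List.append_assoc, List.singleton_append]
      simp [hnp]
    · simp only [hab, if_false]
      rw [ih (m / 10) (by omega)]
      have hiff : ((pvDigs (m / 10) ++ [Nat.digitChar (m % 10)]).Pairwise (· ≤ ·)) ↔
          ((pvDigs (m / 10)).Pairwise (· ≤ ·)) := by
        rw [List.pairwise_append]
        constructor
        · exact fun hp => hp.1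
        · intro hp
          refine ⟨hp, by simp, ?_⟩
          intro x hx y hy
          simp at hy; subst hy
          calc x ≤ Nat.digitChar (m / 10 % 10) := pvPairwise_le_last _ hp x hx
            _ ≤ Nat.digitChar (m % 10) := by rw [pvDigitChar_le_iff _ _ hlt10b hlt10a]; omega
      simp [hiff]

lemma pvLoop_eq_loopN (m : Nat) : concatenareNumereLoop (m : Int) = pvLoopN m := by
  induction m using Nat.strong_induction_on with
  | _ m ih =>
  rw [concatenareNumereLoop, pvLoopN]
  by_cases h : 9 < m
  · have h9 : (9 : Int) < (m : Int) := by exact_mod_cast h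
    have hfd : PySem.Int.floordiv (m : Int) 10 = ((m / 10 : Nat) : Int) := by
      exact_mod_cast PySem.Int.floordiv_natCast m 10
    have hmd : PySem.Int.mod (m : Int) 10 = ((m % 10 : Nat) : Int) := by
      exact_mod_cast PySem.Int.mod_natCast m 10
    have hmd2 : PySem.Int.mod ((m / 10 : Nat) : Int) 10 = ((m / 10 % 10 : Nat) : Int) := by
      exact_mod_cast PySem.Int.mod_natCast (m / 10) 10
    simp only [h9, if_true, h, if_true, hfd, hmd, hmd2]
    by_cases hab : m % 10 < m / 10 % 10
    · have hci : ((m % 10 : Nat) : Int) < ((m / 10 % 10 : Nat) : Int) := by exact_mod_cast hab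
      rw [if_pos hci, if_pos hab]
    · have hci : ¬ ((m % 10 : Nat) : Int) < ((m / 10 % 10 : Nat) : Int) := by exact_mod_cast hab
      rw [if_neg hci, if_neg hab]
      exact ih (m / 10) (by omega)
  · have h9 : ¬ (9 : Int) < (m : Int) := by exact_mod_cast h
    simp [h9, h]

lemma pvSorted_self_iff (t : List Char) :
    (t = PySem.List.sorted t (fun x => x) false) ↔ t.Pairwise (· ≤ ·) := by
  constructor
  · intro h
    have hp := PySem.List.sorted_pairwise t (fun x => x) -- (sorted t).Pairwise
    rw [← h] at hp
    exact hp
  · intro hp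
    exact (PySem.List.sorted_eq_self_of_pairwise t (fun x => x) hp).symm

lemma pvLoop_eq_sorted (nr : Int) (h9 : ¬ nr ≤ 9) :
    concatenareNumereLoop nr =
      decide (PySem.Int.toChars nr = PySem.List.sorted (PySem.Int.toChars nr) (fun x => x) false) := by
  have hnn : ¬ nr < 0 := by omega
  obtain ⟨m, hm⟩ : ∃ m : Nat, nr = (m : Int) := ⟨nr.toNat, (Int.toNat_of_nonneg (by omega)).symm⟩
  subst hm
  have htc : PySem.Int.toChars (m : Int) = pvDigs m := by
    simp [PySem.Int.toChars, hnn, pvToDigits_eq]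
  rw [htc, pvLoop_eq_loopN, pvLoopN_eq_pairwise]
  simp [pvSorted_self_iff]

-- ===== VERDICT (by name: the statement is the Claim_ definition above) =====
theorem concatenareNumere_spec : Claim_equal_concatenareNumere := by
  unfold Claim_equal_concatenareNumere
  intro l _ _
  unfold Spec_concatenareNumere concatenareNumere concatenareNumere_alt
  rw [pvJoin_flatten, pvFoldl_flatten]
  simp only [List.nil_append]
  cases h : PySem.Int.ofChars? ((l.map PySem.Int.toChars).flatten) with
  | none => rfl
  | some nr =>
    show concatenareNumereLoop nr = (if nr ≤ 9 then true else
      decide (PySem.Int.toChars nr = PySem.List.sorted (PySem.Int.toChars nr) (fun x => x) false))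
    by_cases h9 : nr ≤ 9
    · rw [concatenareNumereLoop]; simp [h9, show ¬ 9 < nr by omega]
    · simp only [h9, if_false]
      exact pvLoop_eq_sorted nr h9
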